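-- pv_equiv track=rewrite | github.com/SamuelJFV/University | Projeto1/Project1.1 - SimpleTest.py | ValidateMatchings
-- ===== SOURCE A (Python) =====
-- def ValidateMatchings(_combination):
--
--     combinationString = ''.join(_combination)
--     usedVertices = []
--
--     for vertice in combinationString:
--         if vertice in usedVertices:
--             return False
--         else:
--             usedVertices.append(vertice)
--
--     return True
-- ===== SOURCE B (Python) =====
-- def ValidateMatchings(_combination):
--     s = ''.join(_combination)
--     return len(set(s)) == len(s)
-- ===== Notes on version B (the rewrite author's own statement) =====
-- stated objective: idiomatic
-- what changed: Replaces the incremental scan with a per-character membership test and early return by a single aggregate comparison: build the joined string once and compare len(set(s)) with len(s).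
import Mathlib
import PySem

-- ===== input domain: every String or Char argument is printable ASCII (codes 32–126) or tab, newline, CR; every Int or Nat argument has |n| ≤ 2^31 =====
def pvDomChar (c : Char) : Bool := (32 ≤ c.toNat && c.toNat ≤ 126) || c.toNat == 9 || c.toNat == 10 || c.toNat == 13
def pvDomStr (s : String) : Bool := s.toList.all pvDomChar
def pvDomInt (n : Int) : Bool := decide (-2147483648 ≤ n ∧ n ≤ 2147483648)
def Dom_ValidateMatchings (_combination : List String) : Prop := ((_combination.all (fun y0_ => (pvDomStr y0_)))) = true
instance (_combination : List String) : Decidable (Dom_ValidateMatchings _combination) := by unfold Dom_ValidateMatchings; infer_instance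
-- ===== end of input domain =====

-- B builds the joined string once and compares len(set(s)) with len(s); A scans with a membership
-- test and early return. Equivalence of the return values is proved on all inputs.

-- ===== PORT A =====
-- the for-loop over combinationString with the early 'return False'
def pvLoopA (used : List Char) : List Char → Bool
  | [] => true
  | c :: rest => if used.contains c then false else pvLoopA (used ++ [c]) rest

def ValidateMatchings (_combination : List String) : Bool :=
  let combinationString := PySem.Str.join "" _combination
  pvLoopA [] combinationString.toList

-- ===== PORT B =====
def ValidateMatchings_alt (_combination : List String) : Bool :=
  let s := PySem.Str.join "" _combination
  PySem.Set.len (PySem.Set.ofList s.toList) == PySem.Str.len s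

-- ===== PRECONDITION & SPEC =====
def Spec_ValidateMatchings (_combination : List String) (out : Bool) : Prop := out = ValidateMatchings_alt _combination
instance (_combination : List String) (out : Bool) : Decidable (Spec_ValidateMatchings _combination out) := by unfold Spec_ValidateMatchings; infer_instance

-- ===== CLAIM (what is proved, stated in full; the proofs are below) =====
def Claim_equal_ValidateMatchings : Prop := ∀ (_combination : List String), Dom_ValidateMatchings _combination → Spec_ValidateMatchings _combination (ValidateMatchings _combination)

-- ===== LEMMAS AND PROOFS =====

theorem pv_length_add_le (s : PySem.Set Char) (c : Char) :
    (PySem.Set.add s c).length ≤ s.length + 1 := by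
  simp [PySem.Set.add]; split_ifs <;> simp

theorem pv_length_update_le (cs : List Char) (s : PySem.Set Char) :
    (PySem.Set.update s cs).length ≤ s.length + cs.length := by
  induction cs generalizing s with
  | nil => simp [PySem.Set.update]
  | cons c rest ih =>
    have h1 := pv_length_add_le s c
    have h2 := ih (PySem.Set.add s c)
    simp [PySem.Set.update] at h2 ⊢
    omega

theorem pvLoopA_eq (cs : List Char) (s : PySem.Set Char) :
    pvLoopA s cs = ((PySem.Set.update s cs).length == s.length + cs.length) := by
  induction cs generalizing s with
  | nil => simp [pvLoopA, PySem.Set.update]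
  | cons c rest ih =>
    by_cases hm : c ∈ s
    · have hadd : PySem.Set.add s c = s := by simp [PySem.Set.add, hm]
      have hle := pv_length_update_le rest s
      simp [PySem.Set.update] at hle
      simp [pvLoopA, hm, PySem.Set.update]
      intro h
      omega
    · have hadd : PySem.Set.add s c = s ++ [c] := by simp [PySem.Set.add, hm]
      have h2 := ih (s ++ [c])
      simp [PySem.Set.update] at h2
      simp [pvLoopA, hm, PySem.Set.update, h2]
      constructor <;> (intro h; omega)

-- ===== VERDICT (by name: the statement is the Claim_ definition above) =====
theorem ValidateMatchings_spec : Claim_equal_ValidateMatchings := by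
  intro l _
  unfold Spec_ValidateMatchings ValidateMatchings ValidateMatchings_alt
  simp only [pvLoopA_eq, PySem.Set.ofList_eq_foldl]
  simp [PySem.Set.len, PySem.Str.len, PySem.Set.update]
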